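-- pv_equiv track=rewrite | github.com/the-omega-institute/automath | papers/publication/submitted_2026_folded_histograms_sampling_certificates_parry_mismatch_siads/supplementary/scripts/common_phi_fold.py | fold_m
-- ===== SOURCE A (Python) =====
-- from typing import Dict, Iterable, Iterator, List, Sequence, Tuple
--
-- def fib_upto(n: int) -> List[int]:
--     """Return Fibonacci numbers F_1..F_n with F_1=F_2=1."""
--     if n <= 0:
--         return []
--     if n == 1:
--         return [1]
--     f = [1, 1]
--     while len(f) < n:
--         f.append(f[-1] + f[-2])
--     return f
--
-- def zeckendorf_digits(N: int, m: int) -> List[int]: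
--     """Zeckendorf digits (c_1..c_m) for weights F_{k+1}, k=1..m.
--
--     Greedy: pick largest Fibonacci weight <= remaining, skip adjacent.
--     """
--     if N < 0:
--         raise ValueError("N must be non-negative")
--     if m <= 0:
--         return []
--
--     # Need weights up to F_{m+2} (since weight at position k is F_{k+1}).
--     fib = fib_upto(m + 2)
--     # Map position k -> weight F_{k+1} = fib[k] with 0-based indexing.
--     digits = [0] * m
--
--     remaining = N
--     k = m
--     while remaining > 0 and k >= 1:
--         w = fib[k]  # F_{k+1}
--         if w <= remaining:
--             digits[k - 1] = 1
--             remaining -= w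
--             k -= 2  # skip adjacent position
--         else:
--             k -= 1
--
--     return digits
--
-- def fold_m(micro: Sequence[int]) -> List[int]:
--     """Fold a length-m microstate (0/1) to a golden-mean legal word (no '11').
--
--     IMPORTANT:
--     - In the paper, a length-m micro word can carry *one* hidden overflow bit b in
--       the next Fibonacci weight F_{m+2}. The canonical statement is:
--         N(micro) = V_m(Fold_m(micro)) + b * F_{m+2},  b in {0,1}.
--     - Therefore, to compute Fold_m correctly, we compute the Zeckendorf canonical
--       digits up to length (m+1) and then drop the overflow digit.
--     """
--     m = len(micro)
--     if m == 0:
--         return []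
--     fib = fib_upto(m + 2)
--     N = 0
--     for k, b in enumerate(micro, start=1):
--         if b:
--             N += fib[k]  # F_{k+1}
--     # Compute one extra digit to allow the overflow bit at weight F_{m+2},
--     # then drop it to obtain the length-m stable type.
--     digits = zeckendorf_digits(N, m + 1)
--     return digits[:m]
-- ===== SOURCE B (Python) =====
-- def put(w, q):
--     """Add Fibonacci weight F_{q+1} (digit position q, 1-based; w[i] is the digit
--     of weight F_{i+2}) into the word w.  While the digit just above is set,
--     combine with it (F_{q+1} + F_{q+2} = F_{q+3}) and carry upwards; finally
--     write the 1.  Bits are inserted from the highest position down, so the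
--     digit at q and its lower neighbour are always 0 here and w stays a legal
--     (no '11') 0/1 word throughout."""
--     while q + 1 <= len(w) and w[q] == 1:
--         w[q] = 0
--         q = q + 2
--     w += [0] * (q - len(w))
--     w[q - 1] = 1
--     return w
--
--
-- def fold_m(micro):
--     """Fold a length-m microstate to the legal (no '11') word: insert the set
--     bits from the highest position down, rewriting locally with the Fibonacci
--     carry rule; no integer N is ever formed."""
--     m = len(micro)
--     w = []
--     for p in range(m, 0, -1):
--         if micro[p - 1]:
--             w = put(w, p)
--     return (w + [0] * m)[:m]
-- ===== Notes on version B (the rewrite author's own statement) =====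
-- stated objective: faster
-- what changed: Instead of summing the word into one huge integer N and greedily subtracting the largest Fibonacci weight top-down, B never forms N: it inserts each set bit into a digit word from the highest position down and normalizes locally with the Fibonacci carry rule F_{q+1}+F_{q+2}=F_{q+3}, so all values stay 0/1 and the work is linear.
import Mathlib
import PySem

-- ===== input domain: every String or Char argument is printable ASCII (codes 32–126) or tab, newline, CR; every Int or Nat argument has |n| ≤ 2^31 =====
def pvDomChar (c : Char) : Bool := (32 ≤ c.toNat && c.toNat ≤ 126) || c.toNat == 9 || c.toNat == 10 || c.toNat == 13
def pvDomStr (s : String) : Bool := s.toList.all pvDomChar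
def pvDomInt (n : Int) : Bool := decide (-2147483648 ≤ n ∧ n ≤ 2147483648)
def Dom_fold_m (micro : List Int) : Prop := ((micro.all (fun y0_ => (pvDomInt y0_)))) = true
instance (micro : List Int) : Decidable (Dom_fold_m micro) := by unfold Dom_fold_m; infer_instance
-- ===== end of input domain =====

-- B replaces A's "sum to a big integer N, then greedily subtract Fibonacci weights" by a
-- local Fibonacci carry-rewrite on a digit word (no integer N is ever formed); measured faster.

-- ===== PORT A =====

-- fib_upto's while loop: append f[-1] + f[-2] while len(f) < n
def fibGo (f : List Int) (n : Int) : List Int :=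
  if _h : (f.length : Int) < n then
    fibGo (f ++ [PySem.List.pyGetD f (-1) 0 + PySem.List.pyGetD f (-2) 0]) n
  else f
  termination_by (n - f.length).toNat
  decreasing_by simp; omega

def fib_upto (n : Int) : List Int :=
  if n ≤ 0 then []
  else if n = 1 then [1]
  else fibGo [1, 1] n

-- zeckendorf_digits' while loop over (remaining, k)
def zloop (fib digits : List Int) (remaining k : Int) : List Int :=
  if remaining > 0 ∧ k ≥ 1 then
    let w := PySem.List.pyGetD fib k 0
    if w ≤ remaining then
      zloop fib (PySem.List.pySetD digits (k - 1) 1) (remaining - w) (k - 2)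
    else
      zloop fib digits remaining (k - 1)
  else digits
  termination_by k.toNat
  decreasing_by all_goals omega

def zeckendorf_digits (N m : Int) : List Int :=
  if N < 0 then []  -- Python raises ValueError here; unreachable from fold_m (its N is ≥ 0)
  else if m ≤ 0 then []
  else zloop (fib_upto (m + 2)) (List.replicate m.toNat 0) N m

def fold_m (micro : List Int) : List Int :=
  let m : Int := micro.length
  if m = 0 then []
  else
    let fib := fib_upto (m + 2)
    let N : Int := (PySem.List.enumerate micro 1).foldl
      (fun acc kb => if kb.2 ≠ 0 then acc + PySem.List.pyGetD fib kb.1 0 else acc) 0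
    PySem.List.slice (zeckendorf_digits N (m + 1)) none (some m)

-- ===== PORT B =====

-- put's while loop: while the digit just above position q is set, combine and carry up
def put (w : List Int) (q : Int) : List Int :=
  if h : q + 1 ≤ (w.length : Int) ∧ PySem.List.pyGetD w q 0 = 1 then
    put (PySem.List.pySetD w q 0) (q + 2)
  else
    PySem.List.pySetD (w ++ List.replicate (q - (w.length : Int)).toNat 0) (q - 1) 1
  termination_by ((w.length : Int) + 2 - q).toNat
  decreasing_by simp at h ⊢; omega

def fold_m_alt (micro : List Int) : List Int :=
  let m : Int := micro.length
  let w := (PySem.List.pyRange m 0 (-1)).foldl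
    (fun w p => if PySem.List.pyGetD micro (p - 1) 0 ≠ 0 then put w p else w) []
  PySem.List.slice (w ++ List.replicate m.toNat 0) none (some m)

-- ===== PRECONDITION & SPEC =====
def Spec_fold_m (micro : List Int) (out : List Int) : Prop := out = fold_m_alt micro
instance (micro : List Int) (out : List Int) : Decidable (Spec_fold_m micro out) := by unfold Spec_fold_m; infer_instance

-- ===== CLAIM (what is proved, stated in full; the proofs are below) =====
def Claim_equal_fold_m : Prop := ∀ (micro : List Int), Dom_fold_m micro → Spec_fold_m micro (fold_m micro)

-- ===== LEMMAS AND PROOFS =====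

-- Value of a digit word whose head sits at Fibonacci index p (the digit of weight
-- Nat.fib p); a word returned by the programs has head index 2: position j (1-based)
-- holds weight F_{j+1} = Nat.fib (j+1), i.e. list index i holds weight Nat.fib (i+2).
def pvVal (p : Nat) : List Int → Int
  | [] => 0
  | x :: t => x * (Nat.fib p : Int) + pvVal (p + 1) t

-- all digits 0/1
def pvOk (d : List Int) : Prop := ∀ x ∈ d, x = 0 ∨ x = 1
-- no two adjacent set digits (Zeckendorf legality)
def pvSep (d : List Int) : Prop := ∀ i : Nat, ¬(d.getD i 0 = 1 ∧ d.getD (i + 1) 0 = 1)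

-- 0/1 mask of the input, as A's truthiness test reads it
def pvMask (micro : List Int) : List Int := micro.map (fun b => if b = 0 then 0 else 1)

-- clean form of A's greedy loop: digits for positions 1..k (low-to-high), remaining rem
def pvGre : Nat → Nat → List Int
  | 0, _ => []
  | 1, r => if Nat.fib 2 ≤ r then [1] else [0]
  | (k + 2), r =>
    if Nat.fib (k + 3) ≤ r then pvGre k (r - Nat.fib (k + 3)) ++ [0, 1]
    else pvGre (k + 1) r ++ [0]

-- the Fibonacci list A builds: fib_upto n = pvFL n.toNat
def pvFL (j : Nat) : List Int := (List.range j).map (fun i => (Nat.fib (i + 1) : Int))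

lemma pvVal_append (a b : List Int) (p : Nat) :
    pvVal p (a ++ b) = pvVal p a + pvVal (p + a.length) b := by
  induction a generalizing p with
  | nil => simp [pvVal]
  | cons x t ih =>
    simp only [List.cons_append, pvVal, ih (p+1), List.length_cons]
    rw [show p + (t.length + 1) = p + 1 + t.length by omega]
    ring

lemma pvVal_replicate (n p : Nat) : pvVal p (List.replicate n 0) = 0 := by
  induction n generalizing p with
  | zero => simp [pvVal]
  | succ k ih => simp [List.replicate_succ, pvVal, ih]

lemma pvVal_nonneg {d : List Int} (h : pvOk d) (p : Nat) : 0 ≤ pvVal p d := by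
  induction d generalizing p with
  | nil => simp [pvVal]
  | cons x t ih =>
    have hx := h x (by simp)
    have ht : pvOk t := fun y hy => h y (by simp [hy])
    have := ih ht (p+1)
    have hf : (0:Int) ≤ (Nat.fib p : Int) := Int.natCast_nonneg _
    rcases hx with h0 | h0 <;> simp [pvVal, h0] <;> omega

lemma pvGetD_append_replicate (d : List Int) (n j : Nat) :
    (d ++ List.replicate n (0 : Int)).getD j 0 = d.getD j 0 := by
  rcases lt_or_ge j d.length with h | h
  · rw [List.getD_append _ _ _ _ h]
  · rw [List.getD_eq_getElem?_getD, List.getD_eq_getElem?_getD]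
    rw [List.getElem?_append_right h, List.getElem?_replicate, List.getElem?_eq_none (by omega)]
    split_ifs <;> rfl

lemma pvGetD_set (d : List Int) (i j : Nat) (x : Int) :
    (d.set i x).getD j 0 = if i = j ∧ i < d.length then x else d.getD j 0 := by
  rw [List.getD_eq_getElem?_getD, List.getD_eq_getElem?_getD, List.getElem?_set]
  split_ifs with h1 h2 h3 <;> simp_all <;> omega

lemma pvOk_getD {d : List Int} (h : pvOk d) (i : Nat) : d.getD i 0 = 0 ∨ d.getD i 0 = 1 := by
  rcases lt_or_ge i d.length with hi | hi
  · rw [List.getD_eq_getElem _ _ hi]; exact h _ (List.getElem_mem hi)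
  · rw [List.getD_eq_default _ _ hi]; left; rfl

lemma pvVal_set (d : List Int) (i : Nat) (x : Int) (hi : i < d.length) (p : Nat) :
    pvVal p (d.set i x) = pvVal p d + (x - d.getD i 0) * (Nat.fib (p + i) : Int) := by
  induction d generalizing i p with
  | nil => simp at hi
  | cons y t ih =>
    cases i with
    | zero => simp [pvVal, List.set]; ring
    | succ k =>
      have hk := ih k (by simpa using hi) (p + 1)
      simp only [List.set_cons_succ, pvVal, List.getD_cons_succ, hk]
      rw [show p + 1 + k = p + (k + 1) by omega]
      ring

lemma pvGetD_append_self (f u : List Int) (j : Nat) :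
    (f ++ u).getD (f.length + j) 0 = u.getD j 0 := by
  rw [List.getD_eq_getElem?_getD, List.getD_eq_getElem?_getD,
    List.getElem?_append_right (by omega)]
  simp

lemma pvOk_append {a b : List Int} (h : pvOk (a ++ b)) : pvOk a ∧ pvOk b := by
  constructor <;> intro x hx <;> exact h x (by simp [hx])

lemma pvSep_prefix {a b : List Int} (h : pvSep (a ++ b)) : pvSep a := by
  intro i ⟨h1, h2⟩
  rcases lt_or_ge (i + 1) a.length with hi | hi
  · exact h i ⟨by rw [List.getD_append _ _ _ _ (by omega)]; exact h1,
      by rw [List.getD_append _ _ _ _ hi]; exact h2⟩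
  · rw [List.getD_eq_default _ _ hi] at h2; exact absurd h2 (by norm_num)

lemma pvSep_append_01 {a : List Int} (h : pvSep a) : pvSep (a ++ [0, 1]) := by
  intro i ⟨h1, h2⟩
  rcases lt_or_ge (i + 1) a.length with hi | hi
  · rw [List.getD_append _ _ _ _ (by omega)] at h1
    rw [List.getD_append _ _ _ _ hi] at h2
    exact h i ⟨h1, h2⟩
  · rcases lt_or_ge i a.length with hi2 | hi2
    · have : i + 1 = a.length + 0 := by omega
      rw [this, pvGetD_append_self] at h2
      exact absurd h2 (by norm_num)
    · have e1 : i = a.length + (i - a.length) := by omega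
      rw [e1, pvGetD_append_self] at h1
      have e2 : i + 1 = a.length + (i - a.length + 1) := by omega
      rw [e2, pvGetD_append_self] at h2
      rcases Nat.lt_or_ge (i - a.length) 2 with h3 | h3
      · interval_cases h : (i - a.length) <;> simp_all
      · rw [List.getD_eq_default _ _ (by simp; omega)] at h1
        exact absurd h1 (by norm_num)

lemma pvSep_append_0 {a : List Int} (h : pvSep a) : pvSep (a ++ [0]) := by
  intro i ⟨h1, h2⟩
  rcases lt_or_ge (i + 1) a.length with hi | hi
  · rw [List.getD_append _ _ _ _ (by omega)] at h1
    rw [List.getD_append _ _ _ _ hi] at h2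
    exact h i ⟨h1, h2⟩
  · rcases lt_or_ge i a.length with hi2 | hi2
    · have : i + 1 = a.length + 0 := by omega
      rw [this, pvGetD_append_self] at h2
      exact absurd h2 (by norm_num)
    · rcases Nat.eq_or_lt_of_le hi2 with h3 | h3
      · have e1 : i = a.length + 0 := by omega
        rw [e1, pvGetD_append_self] at h1
        exact absurd h1 (by norm_num)
      · rw [List.getD_eq_default _ _ (by simp; omega)] at h1
        exact absurd h1 (by norm_num)

lemma pvVal_le {d : List Int} (h : pvOk d) (p : Nat) :
    pvVal p d ≤ (Nat.fib (p + d.length + 1) : Int) - Nat.fib (p + 1) := by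
  induction d generalizing p with
  | nil => simp [pvVal]
  | cons x t ih =>
    have hx := h x (by simp)
    have ht : pvOk t := fun y hy => h y (by simp [hy])
    have ihh := ih ht (p + 1)
    have hf : (Nat.fib (p + 2) : Int) = Nat.fib p + Nat.fib (p + 1) := by
      have := Nat.fib_add_two (n := p); exact_mod_cast this
    have hfp : (0 : Int) ≤ (Nat.fib p : Int) := Int.natCast_nonneg _
    have hmul : x * (Nat.fib p : Int) ≤ (Nat.fib p : Int) := by
      rcases hx with h0 | h0 <;> simp [h0]
    simp only [pvVal, List.length_cons]
    have e1 : p + 1 + t.length + 1 = p + (t.length + 1) + 1 := by omega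
    rw [e1] at ihh
    have e2 : p + 1 + 1 = p + 2 := by omega
    rw [e2] at ihh
    linarith

lemma pvVal_lt : ∀ (n : Nat) (d : List Int), d.length = n → pvOk d → pvSep d →
    ∀ p, 2 ≤ p → pvVal p d < (Nat.fib (p + n) : Int) := by
  intro n
  induction n using Nat.strong_induction_on with
  | _ n IH =>
    intro d hlen hok hsep p hp
    rcases List.eq_nil_or_concat' d with rfl | ⟨e, b, rfl⟩
    · simp only [List.length_nil] at hlen
      subst hlen
      simp only [pvVal, Nat.add_zero]
      exact_mod_cast Nat.fib_pos.mpr (by omega)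
    · simp only [List.length_append, List.length_cons, List.length_nil] at hlen
      have hle : e.length = n - 1 := by omega
      have hn1 : 1 ≤ n := by omega
      have hoke := (pvOk_append hok).1
      have hsepe := pvSep_prefix hsep
      have hb := (pvOk_append hok).2 b (by simp)
      rw [pvVal_append]
      simp only [pvVal]
      rcases hb with h0 | h1
      · have := IH (n - 1) (by omega) e hle hoke hsepe p hp
        have hmono : (Nat.fib (p + (n - 1)) : Int) ≤ Nat.fib (p + n) := by
          exact_mod_cast Nat.fib_mono (by omega)
        simp [h0]
        omega
      · rcases List.eq_nil_or_concat' e with rfl | ⟨f, c, rfl⟩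
        · simp only [List.length_nil] at hle
          have : n = 1 := by omega
          subst this
          simp only [pvVal, h1, List.length_nil, Nat.add_zero, mul_one, one_mul, add_zero]
          have := Nat.fib_lt_fib_succ (n := p) hp
          push_cast
          omega
        · -- d = f ++ [c] ++ [b], b = 1, so c = 0 by separation
          have hflen : f.length = n - 2 := by
            simp only [List.length_append, List.length_cons, List.length_nil] at hle
            omega
          have hn2 : 2 ≤ n := by
            simp only [List.length_append, List.length_cons, List.length_nil] at hle
            omega
          have hcb : ((f ++ [c]) ++ [b] : List Int) = f ++ [c, b] := by simp
          have hc1 : c ≠ 1 := by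
            intro hcc
            apply hsep f.length
            constructor
            · rw [hcb, show f.length = f.length + 0 from rfl, pvGetD_append_self]
              simpa using hcc
            · rw [hcb, pvGetD_append_self]
              simpa using h1
          have hc0 : c = 0 := by
            rcases (pvOk_append hoke).2 c (by simp) with h | h
            · exact h
            · exact absurd h hc1
          have hokf := (pvOk_append hoke).1
          have hsepf := pvSep_prefix hsepe
          have ihf := IH (n - 2) (by omega) f hflen hokf hsepf p hp
          rw [pvVal_append]
          simp only [pvVal, hc0, h1, List.length_append, List.length_cons, List.length_nil,
            zero_mul, add_zero, zero_add, mul_one, one_mul]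
          have hfib : (Nat.fib (p + n) : Int) = Nat.fib (p + f.length) + Nat.fib (p + f.length + 1) := by
            have h2 := Nat.fib_add_two (n := p + f.length)
            have e2 : p + f.length + 2 = p + n := by omega
            rw [e2] at h2
            push_cast [h2]
            ring
          have e3 : p + (f.length + 1) = p + f.length + 1 := by omega
          rw [e3]
          have hfnn : (0 : Int) ≤ Nat.fib (p + f.length) := Int.natCast_nonneg _
          have e4 : p + (n - 2) = p + f.length := by omega
          rw [e4] at ihf
          linarith

lemma pvUniq : ∀ (n : Nat) (c d : List Int), c.length = n → d.length = n →
    pvOk c → pvSep c → pvOk d → pvSep d → pvVal 2 c = pvVal 2 d → c = d := by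
  intro n
  induction n using Nat.strong_induction_on with
  | _ n IH =>
    intro c d hlc hld hokc hsepc hokd hsepd hv
    rcases List.eq_nil_or_concat' c with rfl | ⟨e, b, rfl⟩
    · simp only [List.length_nil] at hlc
      have : d = [] := List.length_eq_zero_iff.mp (by omega)
      rw [this]
    · rcases List.eq_nil_or_concat' d with rfl | ⟨e2, b2, rfl⟩
      · simp only [List.length_append, List.length_cons, List.length_nil] at hlc
        simp only [List.length_nil] at hld
        omega
      · simp only [List.length_append, List.length_cons, List.length_nil] at hlc hld
        have hle : e.length = n - 1 := by omega
        have hle2 : e2.length = n - 1 := by omega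
        have hoke := (pvOk_append hokc).1
        have hoke2 := (pvOk_append hokd).1
        have hsepe := pvSep_prefix hsepc
        have hsepe2 := pvSep_prefix hsepd
        have hb := (pvOk_append hokc).2 b (by simp)
        have hb2 := (pvOk_append hokd).2 b2 (by simp)
        rw [pvVal_append, pvVal_append] at hv
        simp only [pvVal, mul_zero, add_zero] at hv
        have hlt1 := pvVal_lt (n - 1) e hle hoke hsepe 2 (by omega)
        have hlt2 := pvVal_lt (n - 1) e2 hle2 hoke2 hsepe2 2 (by omega)
        have hnn1 := pvVal_nonneg hoke 2
        have hnn2 := pvVal_nonneg hoke2 2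
        have hil : 2 + e.length = 2 + (n - 1) := by omega
        have hil2 : 2 + e2.length = 2 + (n - 1) := by omega
        rw [hil, hil2] at hv
        have heq : pvVal 2 e = pvVal 2 e2 ∧ b = b2 := by
          rcases hb with hb | hb <;> rcases hb2 with hb2 | hb2 <;>
            rw [hb, hb2] at hv <;> simp only [zero_mul, one_mul, add_zero] at hv <;>
            constructor <;> first | omega | linarith | (exact hb.trans hb2.symm) | rfl
        have := IH (n - 1) (by omega) e e2 hle hle2 hoke hsepe hoke2 hsepe2 heq.1
        rw [this, heq.2]

lemma pvGre_length : ∀ (k r : Nat), (pvGre k r).length = k := by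
  intro k
  induction k using Nat.strong_induction_on with
  | _ k IH =>
    intro r
    match k with
    | 0 => simp [pvGre]
    | 1 => unfold pvGre; split_ifs <;> simp
    | (j + 2) =>
      unfold pvGre
      split_ifs <;> simp [IH j (by omega), IH (j + 1) (by omega)]

lemma pvGre_zero : ∀ (k : Nat), pvGre k 0 = List.replicate k 0 := by
  intro k
  induction k using Nat.strong_induction_on with
  | _ k IH =>
    match k with
    | 0 => simp [pvGre]
    | 1 =>
      unfold pvGre
      rw [if_neg (by simp [Nat.fib])]
      simp
    | (j + 2) =>
      unfold pvGre
      rw [if_neg (by have := Nat.fib_pos.mpr (show 0 < j + 3 by omega); omega)]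
      rw [IH (j + 1) (by omega), List.replicate_succ' (n := j + 1)]

lemma pvGre_spec : ∀ (k r : Nat), r < Nat.fib (k + 2) →
    pvOk (pvGre k r) ∧ pvSep (pvGre k r) ∧ pvVal 2 (pvGre k r) = r := by
  intro k
  induction k using Nat.strong_induction_on with
  | _ k IH =>
    intro r hr
    match k with
    | 0 =>
      have : r = 0 := by simpa [Nat.fib] using hr
      subst this
      refine ⟨by intro x hx; simp [pvGre] at hx, by intro i; simp [pvGre], by simp [pvGre, pvVal]⟩
    | 1 =>
      have hr2 : r < 2 := by simpa [Nat.fib] using hr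
      unfold pvGre
      split_ifs with h
      · have : r = 1 := by simp [Nat.fib] at h; omega
        subst this
        refine ⟨by intro x hx; simp at hx; simp [hx], ?_, by simp [pvVal, Nat.fib]⟩
        intro i ⟨h1, h2⟩
        match i with
        | 0 => simp at h2
        | (j + 1) => simp at h2
      · have : r = 0 := by simp [Nat.fib] at h; omega
        subst this
        refine ⟨by intro x hx; simp at hx; simp [hx], ?_, by simp [pvVal]⟩
        intro i ⟨h1, h2⟩
        match i with
        | 0 => simp at h1
        | (j + 1) => simp at h2
    | (j + 2) =>
      unfold pvGre
      split_ifs with h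
      · obtain ⟨ok1, sep1, val1⟩ := IH j (by omega) (r - Nat.fib (j + 3)) (by
          have h2 := Nat.fib_add_two (n := j + 2)
          rw [show j + 2 + 1 = j + 3 by omega] at h2
          omega)
        refine ⟨?_, pvSep_append_01 sep1, ?_⟩
        · intro x hx
          rcases List.mem_append.mp hx with hx | hx
          · exact ok1 x hx
          · simp at hx; rcases hx with h | h <;> simp [h]
        · rw [pvVal_append, val1, pvGre_length]
          simp only [pvVal, zero_mul, zero_add, one_mul, add_zero, mul_zero]
          have e1 : 2 + j + 1 = j + 3 := by omega
          rw [e1]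
          have hle : Nat.fib (j + 3) ≤ r := h
          push_cast
          omega
      · obtain ⟨ok1, sep1, val1⟩ := IH (j + 1) (by omega) r (by rw [show j + 1 + 2 = j + 3 by omega]; exact Nat.not_le.mp h)
        refine ⟨?_, pvSep_append_0 sep1, ?_⟩
        · intro x hx
          rcases List.mem_append.mp hx with hx | hx
          · exact ok1 x hx
          · simp at hx; simp [hx]
        · rw [pvVal_append, val1]
          simp [pvVal]

lemma pvFL_getD {j k : Nat} (h : k < j) : (pvFL j).getD k 0 = (Nat.fib (k + 1) : Int) := by
  rw [pvFL, List.getD_eq_getElem _ _ (by simpa using h)]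
  simp

lemma pvSplit (d : List Int) (k : Nat) (hk : k ≤ d.length) (h : ∀ i < k, d.getD i 0 = 0) :
    d = List.replicate k 0 ++ d.drop k := by
  apply List.ext_getElem
  · simp; omega
  · intro i hi1 hi2
    rcases lt_or_ge i k with hik | hik
    · rw [List.getElem_append_left (by simpa using hik)]
      have := h i hik
      rw [List.getD_eq_getElem _ _ (by omega)] at this
      simp [this]
    · rw [List.getElem_append_right (by simpa using hik)]
      simp only [List.getElem_drop, List.length_replicate]
      congr 1
      omega

lemma pvFibGo (n : Int) : ∀ (fuel j : Nat), n.toNat ≤ j + fuel → 2 ≤ j →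
    fibGo (pvFL j) n = pvFL (max j n.toNat) := by
  intro fuel
  induction fuel with
  | zero =>
    intro j hle hj
    rw [fibGo, dif_neg (by simp [pvFL]; omega)]
    congr 1
    omega
  | succ fuel ih =>
    intro j hle hj
    rw [fibGo]
    split_ifs with h
    · have hlen : ((pvFL j).length : Int) = (j : Int) := by simp [pvFL]
      rw [hlen] at h
      obtain ⟨i, rfl⟩ : ∃ i, j = i + 2 := ⟨j - 2, by omega⟩
      have h1 : PySem.List.pyGetD (pvFL (i + 2)) (-1) 0 = (Nat.fib (i + 2) : Int) := by
        rw [PySem.List.pyGetD_neg_ofNat (pvFL (i + 2)) 1 0 (by omega) (by simp [pvFL])]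
        simp [pvFL]
      have h2 : PySem.List.pyGetD (pvFL (i + 2)) (-2) 0 = (Nat.fib (i + 1) : Int) := by
        rw [PySem.List.pyGetD_neg_ofNat (pvFL (i + 2)) 2 0 (by omega) (by simp [pvFL])]
        simp [pvFL]
      have hf : (Nat.fib (i + 3) : Int) = (Nat.fib (i + 2) : Int) + Nat.fib (i + 1) := by
        have hft := Nat.fib_add_two (n := i + 1)
        rw [show i + 1 + 2 = i + 3 by omega, show i + 1 + 1 = i + 2 by omega] at hft
        push_cast [hft]; ring
      have h3 : pvFL (i + 2) ++ [PySem.List.pyGetD (pvFL (i + 2)) (-1) 0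
          + PySem.List.pyGetD (pvFL (i + 2)) (-2) 0] = pvFL (i + 3) := by
        rw [h1, h2, ← hf]
        simp [pvFL, List.range_succ]
      rw [h3, ih (i + 3) (by omega) (by omega)]
      congr 1
      omega
    · have hlen : ((pvFL j).length : Int) = (j : Int) := by simp [pvFL]
      rw [hlen] at h
      congr 1
      omega

lemma pvFibUpto {n : Int} (h : 2 ≤ n) : fib_upto n = pvFL n.toNat := by
  rw [fib_upto, if_neg (by omega), if_neg (by omega)]
  have h2 : pvFL 2 = [1, 1] := by
    simp [pvFL, List.range_succ]
  rw [← h2, pvFibGo n n.toNat 2 (by omega) (by omega)]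
  congr 1
  omega

lemma pvGre_succ2 (k r : Nat) : pvGre (k + 2) r =
    if Nat.fib (k + 3) ≤ r then pvGre k (r - Nat.fib (k + 3)) ++ [0, 1]
    else pvGre (k + 1) r ++ [0] := by
  rfl

-- A's while loop computes pvGre
lemma pvZloop (L : Nat) : ∀ (k rem : Nat) (digits : List Int), k < L → k ≤ digits.length →
    (∀ i < k, digits.getD i 0 = 0) →
    zloop (pvFL L) digits (rem : Int) (k : Int) = pvGre k rem ++ digits.drop k := by
  intro k
  induction k using Nat.strong_induction_on with
  | _ k IH =>
    intro rem digits hkL hkd hz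
    by_cases hrem : rem = 0
    · subst hrem
      have hc : ¬(((0 : Nat) : Int) > 0 ∧ ((k : Nat) : Int) ≥ 1) := by omega
      rw [zloop, if_neg hc, pvGre_zero]
      exact pvSplit digits k hkd hz
    · rcases Nat.lt_or_ge k 2 with hk2 | hk2
      · interval_cases k
        · have hc : ¬(((rem : Nat) : Int) > 0 ∧ ((0 : Nat) : Int) ≥ 1) := by omega
          rw [zloop, if_neg hc]
          simp [pvGre]
        · have hc : (((rem : Nat) : Int) > 0 ∧ ((1 : Nat) : Int) ≥ 1) := by omega
          rw [zloop, if_pos hc]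
          have hw : PySem.List.pyGetD (pvFL L) ((1 : Nat) : Int) 0 = (Nat.fib 2 : Int) := by
            rw [PySem.List.pyGetD_natCast, pvFL_getD hkL]
          simp only [hw]
          rw [if_pos (show (Nat.fib 2 : Int) ≤ ((rem : Nat) : Int) by rw [Nat.fib_two]; omega)]
          have hc2 : ¬((((rem : Nat) : Int) - (Nat.fib 2 : Int)) > 0 ∧ (((1 : Nat) : Int) - 2) ≥ 1) := by
            omega
          rw [zloop, if_neg hc2]
          have hset : PySem.List.pySetD digits (((1 : Nat) : Int) - 1) 1 = digits.set 0 1 := by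
            rw [show ((1 : Nat) : Int) - 1 = ((0 : Nat) : Int) by omega,
              PySem.List.pySetD_natCast]
          rw [hset]
          unfold pvGre
          rw [if_pos (show Nat.fib 2 ≤ rem by rw [Nat.fib_two]; omega)]
          rcases digits with _ | ⟨x, t⟩
          · simp at hkd
          · simp [List.set]
      · obtain ⟨j, rfl⟩ : ∃ j, k = j + 2 := ⟨k - 2, by omega⟩
        have hc : (((rem : Nat) : Int) > 0 ∧ ((j + 2 : Nat) : Int) ≥ 1) := by omega
        rw [zloop, if_pos hc]
        have hw : PySem.List.pyGetD (pvFL L) ((j + 2 : Nat) : Int) 0 = (Nat.fib (j + 3) : Int) := by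
          rw [PySem.List.pyGetD_natCast, pvFL_getD hkL, show j + 2 + 1 = j + 3 by omega]
        simp only [hw]
        split_ifs with hpick
        · have hfle : Nat.fib (j + 3) ≤ rem := by exact_mod_cast hpick
          have hset : PySem.List.pySetD digits (((j + 2 : Nat) : Int) - 1) 1
              = digits.set (j + 1) 1 := by
            rw [show ((j + 2 : Nat) : Int) - 1 = ((j + 1 : Nat) : Int) by push_cast; ring,
              PySem.List.pySetD_natCast]
          have hremc : ((rem : Int) - (Nat.fib (j + 3) : Int))
              = ((rem - Nat.fib (j + 3) : Nat) : Int) := by push_cast [hfle]; ring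
          have hkc : ((j + 2 : Nat) : Int) - 2 = ((j : Nat) : Int) := by push_cast; ring
          rw [hset, hremc, hkc]
          rw [IH j (by omega) (rem - Nat.fib (j + 3)) (digits.set (j + 1) 1) (by omega)
            (by simp; omega)
            (by
              intro i hi
              rw [pvGetD_set, if_neg (by omega)]
              exact hz i (by omega))]
          have hdrop : (digits.set (j + 1) 1).drop j = 0 :: 1 :: digits.drop (j + 2) := by
            apply List.ext_getElem
            · simp
              omega
            · intro i h1 h2
              rw [List.getElem_drop]
              match i, h2 with
              | 0, _ =>
                rw [List.getElem_set_ne (by omega)]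
                have := hz j (by omega)
                rw [List.getD_eq_getElem _ _ (by omega)] at this
                simpa using this
              | 1, _ =>
                simp only [List.getElem_cons_succ, List.getElem_cons_zero]
                rw [List.getElem_set_self (by simp; omega)]
              | (i' + 2), h2 =>
                simp only [List.getElem_cons_succ]
                rw [List.getElem_set_ne (by omega), List.getElem_drop]
                congr 1
                omega
          rw [hdrop, pvGre_succ2, if_pos hfle]
          simp
        · have hnle : ¬ Nat.fib (j + 3) ≤ rem := by
            intro hcon
            exact hpick (by exact_mod_cast hcon)
          have hkc : ((j + 2 : Nat) : Int) - 1 = ((j + 1 : Nat) : Int) := by push_cast; ring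
          rw [hkc]
          rw [IH (j + 1) (by omega) rem digits (by omega) (by omega)
            (fun i hi => hz i (by omega))]
          have hdrop : digits.drop (j + 1) = 0 :: digits.drop (j + 2) := by
            rw [List.drop_eq_getElem_cons (by omega)]
            have := hz (j + 1) (by omega)
            rw [List.getD_eq_getElem _ _ (by omega)] at this
            rw [this]
          rw [hdrop, pvGre_succ2, if_neg hnle]
          simp

-- A's accumulation loop computes the value of the mask
lemma pvNA (L : Nat) : ∀ (t : List Int) (s : Nat) (acc : Int), 1 ≤ s → s + t.length ≤ L →
    (PySem.List.enumerate t (s : Int)).foldl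
      (fun acc kb => if kb.2 ≠ 0 then acc + PySem.List.pyGetD (pvFL L) kb.1 0 else acc) acc
      = acc + pvVal (s + 1) (pvMask t) := by
  intro t
  induction t with
  | nil => intro s acc _ _; simp [PySem.List.enumerate_nil, pvMask, pvVal]
  | cons b t ih =>
    intro s acc hs hlen
    rw [PySem.List.enumerate_cons, List.foldl_cons]
    have hsk : ((s : Int) + 1) = ((s + 1 : Nat) : Int) := by push_cast; ring
    have hget : PySem.List.pyGetD (pvFL L) (s : Int) 0 = (Nat.fib (s + 1) : Int) := by
      rw [PySem.List.pyGetD_natCast, pvFL_getD (by simp at hlen; omega)]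
    rw [hsk, ih (s + 1) _ (by omega) (by simp at hlen ⊢; omega)]
    simp only [pvMask, List.map_cons, pvVal]
    split_ifs with hb hb2 <;>
      first
        | omega
        | (rw [hget]; ring)
        | ring

-- B's put, write branch: no carry pending at q, so it extends with zeros and writes the 1
lemma pvPutBase (w : List Int) (q : Nat) (hq : 1 ≤ q) (hok : pvOk w) (hsep : pvSep w)
    (hd1 : w.getD (q - 1) 0 = 0) (hd2 : w.getD (q - 2) 0 = 0) (hq0 : w.getD q 0 = 0) :
    pvOk (PySem.List.pySetD (w ++ List.replicate (((q : Int) - (w.length : Int)).toNat) 0)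
        ((q : Int) - 1) 1) ∧
    pvSep (PySem.List.pySetD (w ++ List.replicate (((q : Int) - (w.length : Int)).toNat) 0)
        ((q : Int) - 1) 1) ∧
    pvVal 2 (PySem.List.pySetD (w ++ List.replicate (((q : Int) - (w.length : Int)).toNat) 0)
        ((q : Int) - 1) 1) = pvVal 2 w + (Nat.fib (q + 1) : Int) ∧
    (∀ j : Nat, j + 1 < q → (PySem.List.pySetD
        (w ++ List.replicate (((q : Int) - (w.length : Int)).toNat) 0)
        ((q : Int) - 1) 1).getD j 0 = w.getD j 0) := by
  have hidx : ((q : Int) - 1) = ((q - 1 : Nat) : Int) := by omega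
  rw [hidx, PySem.List.pySetD_natCast]
  set W := w ++ List.replicate (((q : Int) - (w.length : Int)).toNat) 0 with hW
  have hWget : ∀ j : Nat, W.getD j 0 = w.getD j 0 := fun j => pvGetD_append_replicate _ _ _
  have hWlen : W.length = w.length + ((q : Int) - (w.length : Int)).toNat := by simp [hW]
  have hlt : q - 1 < W.length := by omega
  have hr : ∀ j : Nat, (W.set (q - 1) 1).getD j 0 = if j = q - 1 then 1 else w.getD j 0 := by
    intro j
    rw [pvGetD_set]
    by_cases hj : q - 1 = j
    · rw [if_pos ⟨hj, hlt⟩, if_pos hj.symm]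
    · rw [if_neg (by tauto), if_neg (fun hc => hj hc.symm), hWget]
  refine ⟨?_, ?_, ?_, ?_⟩
  · intro x hx
    rcases List.mem_or_eq_of_mem_set hx with hx | hx
    · rcases List.mem_append.mp hx with hx | hx
      · exact hok x hx
      · left; exact List.eq_of_mem_replicate hx
    · right; exact hx
  · intro i ⟨h1, h2⟩
    rw [hr] at h1 h2
    split_ifs at h1 h2 with ha hb
    · omega
    · -- i = q - 1, so i + 1 = q and w.getD q 0 = 0
      rw [show i + 1 = q by omega] at h2
      omega
    · -- i + 1 = q - 1, so i = q - 2 and w.getD (q - 2) 0 = 0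
      rw [show i = q - 2 by omega] at h1
      omega
    · exact hsep i ⟨h1, h2⟩
  · rw [pvVal_set _ _ _ hlt, pvVal_append, pvVal_replicate, hWget, hd1,
      show 2 + (q - 1) = q + 1 by omega]
    ring
  · intro j hj
    rw [hr, if_neg (by omega)]

-- put adds the weight of position q, keeps the word legal, and fixes digits below q - 1
lemma pvPutAux : ∀ (fuel : Nat) (w : List Int) (q : Nat), w.length + 2 - q ≤ fuel → 1 ≤ q →
    pvOk w → pvSep w → w.getD (q - 1) 0 = 0 → w.getD (q - 2) 0 = 0 →
    pvOk (put w (q : Int)) ∧ pvSep (put w (q : Int)) ∧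
      pvVal 2 (put w (q : Int)) = pvVal 2 w + (Nat.fib (q + 1) : Int) ∧
      (∀ j : Nat, j + 1 < q → (put w (q : Int)).getD j 0 = w.getD j 0) := by
  intro fuel
  induction fuel with
  | zero =>
    intro w q hfuel hq hok hsep hd1 hd2
    have hnb : ¬((q : Int) + 1 ≤ (w.length : Int) ∧ PySem.List.pyGetD w (q : Int) 0 = 1) := by
      intro ⟨h1, _⟩; omega
    rw [put, dif_neg hnb]
    exact pvPutBase w q hq hok hsep hd1 hd2 (by
      rw [List.getD_eq_default _ _ (by omega)])
  | succ fuel ihf =>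
    intro w q hfuel hq hok hsep hd1 hd2
    rw [put]
    split_ifs with hb
    · -- carry branch: w[q] == 1, clear it and carry at q + 2
      obtain ⟨hble, hbeq⟩ := hb
      rw [PySem.List.pyGetD_natCast] at hbeq
      have hqlen : q < w.length := by omega
      have hset : PySem.List.pySetD w (q : Int) 0 = w.set q 0 := PySem.List.pySetD_natCast w q 0
      have hc2 : ((q : Int) + 2) = ((q + 2 : Nat) : Int) := by push_cast; ring
      rw [hset, hc2]
      have hok' : pvOk (w.set q 0) := by
        intro x hx
        rcases List.mem_or_eq_of_mem_set hx with hx | hx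
        · exact hok x hx
        · simp [hx]
      have hset0 : ∀ j, (w.set q 0).getD j 0 = 1 → w.getD j 0 = 1 := by
        intro j hj
        rw [pvGetD_set] at hj
        split_ifs at hj with hc
        · norm_num at hj
        · exact hj
      have hsep' : pvSep (w.set q 0) := fun i ⟨h1, h2⟩ => hsep i ⟨hset0 _ h1, hset0 _ h2⟩
      have hup : (w.set q 0).getD (q + 2 - 1) 0 = 0 := by
        rw [pvGetD_set, if_neg (by omega), show q + 2 - 1 = q + 1 by omega]
        rcases pvOk_getD hok (q + 1) with h | h
        · exact h
        · exact absurd ⟨hbeq, h⟩ (hsep q)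
      have hat : (w.set q 0).getD (q + 2 - 2) 0 = 0 := by
        rw [pvGetD_set, if_pos (by omega)]
      obtain ⟨rok, rsep, rval, rfix⟩ := ihf (w.set q 0) (q + 2) (by simp; omega) (by omega)
        hok' hsep' hup hat
      refine ⟨rok, rsep, ?_, ?_⟩
      · rw [rval, pvVal_set w q 0 hqlen 2, hbeq]
        have hft := Nat.fib_add_two (n := q + 1)
        rw [show q + 1 + 2 = q + 2 + 1 by omega, show q + 1 + 1 = q + 2 by omega] at hft
        rw [show 2 + q = q + 2 by omega]
        push_cast [hft]
        ring
      · intro j hj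
        rw [rfix j (by omega), pvGetD_set, if_neg (by omega)]
    · -- write branch
      have hq0 : w.getD q 0 = 0 := by
        rcases Nat.lt_or_ge q w.length with hlt | hge
        · rcases pvOk_getD hok q with h | h
          · exact h
          · exfalso
            apply hb
            refine ⟨by omega, ?_⟩
            rw [PySem.List.pyGetD_natCast]
            exact h
        · rw [List.getD_eq_default _ _ hge]
      exact pvPutBase w q hq hok hsep hd1 hd2 hq0

lemma pvPut (w : List Int) (q : Nat) (hq : 1 ≤ q) (hok : pvOk w) (hsep : pvSep w)
    (hd1 : w.getD (q - 1) 0 = 0) (hd2 : w.getD (q - 2) 0 = 0) :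
    pvOk (put w (q : Int)) ∧ pvSep (put w (q : Int)) ∧
      pvVal 2 (put w (q : Int)) = pvVal 2 w + (Nat.fib (q + 1) : Int) ∧
      (∀ j : Nat, j + 1 < q → (put w (q : Int)).getD j 0 = w.getD j 0) :=
  pvPutAux (w.length + 2) w q (by omega) hq hok hsep hd1 hd2

-- B's outer loop: inserting positions p..1 (descending) adds the value of the low mask
lemma pvLoopB (micro : List Int) : ∀ (p : Nat), p ≤ micro.length → ∀ (w : List Int),
    pvOk w → pvSep w → (∀ j < p, w.getD j 0 = 0) →
    pvOk ((PySem.List.pyRange (p : Int) 0 (-1)).foldl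
        (fun w p => if PySem.List.pyGetD micro (p - 1) 0 ≠ 0 then put w p else w) w) ∧
    pvSep ((PySem.List.pyRange (p : Int) 0 (-1)).foldl
        (fun w p => if PySem.List.pyGetD micro (p - 1) 0 ≠ 0 then put w p else w) w) ∧
    pvVal 2 ((PySem.List.pyRange (p : Int) 0 (-1)).foldl
        (fun w p => if PySem.List.pyGetD micro (p - 1) 0 ≠ 0 then put w p else w) w)
      = pvVal 2 w + pvVal 2 ((pvMask micro).take p) := by
  intro p
  induction p with
  | zero =>
    intro _ w hok hsep _
    rw [PySem.List.pyRange_neg_one_eq_nil (by omega)]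
    simp [pvVal]
    exact ⟨hok, hsep⟩
  | succ p ih =>
    intro hp w hok hsep hz
    rw [PySem.List.pyRange_neg_one_cons (by omega), List.foldl_cons,
      show ((p + 1 : Nat) : Int) - 1 = ((p : Nat) : Int) by push_cast; ring]
    have hplen : p < micro.length := by omega
    have hgd : PySem.List.pyGetD micro ((p : Nat) : Int) 0 = micro.getD p 0 :=
      PySem.List.pyGetD_natCast micro p 0
    have hmlen : (pvMask micro).length = micro.length := by simp [pvMask]
    have htake : (pvMask micro).take (p + 1)
        = (pvMask micro).take p ++ [if micro[p] = 0 then 0 else 1] := by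
      rw [List.take_succ]
      congr 1
      rw [List.getElem?_eq_getElem (by omega)]
      simp [pvMask]
    have htlen : ((pvMask micro).take p).length = p := by
      rw [List.length_take]
      omega
    have hvtake : pvVal 2 ((pvMask micro).take (p + 1))
        = pvVal 2 ((pvMask micro).take p)
          + (if micro[p] = 0 then 0 else 1) * (Nat.fib (p + 2) : Int) := by
      rw [htake, pvVal_append, htlen]
      simp only [pvVal, add_zero]
      rw [show 2 + p = p + 2 by omega]
    split_ifs with hcond
    · -- bit set at position p + 1 (index p)
      rw [hgd] at hcond
      obtain ⟨pok, psep, pval, pfix⟩ := pvPut w (p + 1) (by omega) hok hsep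
        (by rw [show p + 1 - 1 = p from rfl]; exact hz p (by omega))
        (by exact hz (p + 1 - 2) (by omega))
      obtain ⟨rok, rsep, rval⟩ := ih (by omega) (put w ((p + 1 : Nat) : Int)) pok psep
        (by
          intro j hj
          rw [pfix j (by omega)]
          exact hz j (by omega))
      refine ⟨rok, rsep, ?_⟩
      rw [rval, pval, hvtake]
      have hm : micro[p] ≠ 0 := by
        rw [List.getD_eq_getElem _ _ hplen] at hcond
        exact hcond
      rw [if_neg hm, show p + 1 + 1 = p + 2 by omega]
      ring
    · rw [hgd] at hcond
      have hm : micro[p] = 0 := by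
        rw [List.getD_eq_getElem _ _ hplen] at hcond
        simpa using hcond
      obtain ⟨rok, rsep, rval⟩ := ih (by omega) w hok hsep (fun j hj => hz j (by omega))
      refine ⟨rok, rsep, ?_⟩
      rw [rval, hvtake, if_pos hm]
      ring

-- appending zeros changes neither legality nor value, and a long-enough zero pad
-- makes `take` agree
lemma pvOk_pad {d : List Int} (h : pvOk d) (n : Nat) : pvOk (d ++ List.replicate n 0) := by
  intro x hx
  rcases List.mem_append.mp hx with hx | hx
  · exact h x hx
  · left; exact List.eq_of_mem_replicate hx

lemma pvSep_pad {d : List Int} (h : pvSep d) (n : Nat) : pvSep (d ++ List.replicate n 0) :=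
  fun i ⟨h1, h2⟩ => h i ⟨by rw [pvGetD_append_replicate] at h1; exact h1,
    by rw [pvGetD_append_replicate] at h2; exact h2⟩

lemma pvTakePad (d : List Int) (a b M : Nat) (ha : M ≤ d.length + a) (hb : M ≤ d.length + b) :
    (d ++ List.replicate a (0 : Int)).take M = (d ++ List.replicate b 0).take M := by
  apply List.ext_getElem
  · simp; omega
  · intro i h1 h2
    simp only [List.getElem_take]
    rcases Nat.lt_or_ge i d.length with hi | hi
    · rw [List.getElem_append_left hi, List.getElem_append_left hi]
    · rw [List.getElem_append_right hi, List.getElem_append_right hi]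
      simp

-- ===== VERDICT (by name: the statement is the Claim_ definition above) =====
theorem fold_m_spec : Claim_equal_fold_m := by
  intro micro _
  show fold_m micro = fold_m_alt micro
  rcases Nat.eq_zero_or_pos micro.length with hM0 | hM0
  · have h0 : micro = [] := List.length_eq_zero_iff.mp hM0
    subst h0
    rfl
  · -- notation
    have hokm : pvOk (pvMask micro) := by
      intro x hx
      simp only [pvMask, List.mem_map] at hx
      obtain ⟨b, _, rfl⟩ := hx
      split_ifs <;> simp
    have hmlen : (pvMask micro).length = micro.length := by simp [pvMask]
    have hvnn := pvVal_nonneg hokm 2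
    have hbnd := pvVal_le hokm 2
    -- the common abstract value
    set NN : Nat := (pvVal 2 (pvMask micro)).toNat with hNNdef
    have hNN : pvVal 2 (pvMask micro) = (NN : Int) := by omega
    have hNlt : NN < Nat.fib (micro.length + 3) := by
      have h3 : Nat.fib (2 + 1) = 2 := rfl
      rw [hmlen, show 2 + micro.length + 1 = micro.length + 3 by omega, hNN, h3] at hbnd
      have hpos : 0 < Nat.fib (micro.length + 3) := Nat.fib_pos.mpr (by omega)
      omega
    -- A's side
    have hA : fold_m micro = (pvGre (micro.length + 1) NN).take micro.length := by
      simp only [fold_m]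
      rw [if_neg (show ¬(((micro.length : Nat) : Int) = 0) by omega)]
      have hfib : fib_upto ((micro.length : Int) + 2) = pvFL (micro.length + 2) := by
        rw [pvFibUpto (by omega)]
        congr 1
        try omega
      rw [hfib]
      have hNA := pvNA (micro.length + 2) micro 1 0 (by omega) (by omega)
      rw [show ((1 : Nat) : Int) = (1 : Int) by norm_num] at hNA
      rw [hNA, zero_add, hNN]
      rw [zeckendorf_digits, if_neg (show ¬((NN : Int) < 0) by omega),
        if_neg (show ¬(((micro.length : Nat) : Int) + 1 ≤ 0) by omega)]
      have hfib2 : fib_upto ((micro.length : Int) + 1 + 2) = pvFL (micro.length + 3) := by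
        rw [pvFibUpto (by omega)]
        congr 1
        try omega
      rw [hfib2]
      have hrep : ((micro.length : Int) + 1).toNat = micro.length + 1 := by omega
      rw [hrep]
      have hcast : ((micro.length : Int) + 1) = ((micro.length + 1 : Nat) : Int) := by
        push_cast; ring
      rw [hcast]
      rw [pvZloop (micro.length + 3) (micro.length + 1) NN
        (List.replicate (micro.length + 1) 0) (by omega) (by simp)
        (by intro i hi; simp [List.getD_eq_getElem, List.getElem_replicate]; try omega)]
      rw [List.drop_of_length_le (by simp), List.append_nil]
      rw [PySem.List.slice_to_natCast]
    -- B's side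
    have hB : fold_m_alt micro
        = (((PySem.List.pyRange ((micro.length : Nat) : Int) 0 (-1)).foldl
            (fun w p => if PySem.List.pyGetD micro (p - 1) 0 ≠ 0 then put w p else w) [])
          ++ List.replicate micro.length 0).take micro.length := by
      simp only [fold_m_alt]
      rw [show ((micro.length : Int)).toNat = micro.length by omega]
      rw [PySem.List.slice_to_natCast]
    obtain ⟨wok, wsep, wval⟩ := pvLoopB micro micro.length (le_refl _) []
      (by intro x hx; simp at hx) (by intro i ⟨h1, _⟩; simp at h1; try omega)
      (by intro j hj; simp)
    set wf := (PySem.List.pyRange ((micro.length : Nat) : Int) 0 (-1)).foldl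
      (fun w p => if PySem.List.pyGetD micro (p - 1) 0 ≠ 0 then put w p else w) [] with hwf
    rw [List.take_of_length_le (by omega)] at wval
    simp only [pvVal] at wval
    rw [zero_add, hNN] at wval
    -- the greedy word
    obtain ⟨gok, gsep, gval⟩ := pvGre_spec (micro.length + 1) NN (by
      rw [show micro.length + 1 + 2 = micro.length + 3 by omega]; exact hNlt)
    have hglen : (pvGre (micro.length + 1) NN).length = micro.length + 1 := pvGre_length _ _
    -- pad both to a common length and use uniqueness
    set L : Nat := max wf.length (micro.length + 1) with hL
    have hGW : pvGre (micro.length + 1) NN ++ List.replicate (L - (micro.length + 1)) 0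
        = wf ++ List.replicate (L - wf.length) 0 := by
      apply pvUniq L
      · rw [List.length_append, hglen, List.length_replicate]; omega
      · rw [List.length_append, List.length_replicate]; omega
      · exact pvOk_pad gok _
      · exact pvSep_pad gsep _
      · exact pvOk_pad wok _
      · exact pvSep_pad wsep _
      · rw [pvVal_append, pvVal_append, pvVal_replicate, pvVal_replicate, gval, wval]
    have htkG : (pvGre (micro.length + 1) NN ++ List.replicate (L - (micro.length + 1)) 0).take
        micro.length = (pvGre (micro.length + 1) NN).take micro.length := by
      rw [List.take_append_of_le_length (by omega)]
    have htkW : (wf ++ List.replicate (L - wf.length) 0).take micro.length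
        = (wf ++ List.replicate micro.length 0).take micro.length :=
      pvTakePad wf _ _ _ (by omega) (by omega)
    rw [hA, hB, ← htkG, hGW, htkW]
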